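-- pv_equiv track=rewrite | github.com/chen88358323/Mahjong | test/util/cc/duplicateFIle/cc/model/LocalCache.py | clearCacheByKeyList
-- ===== SOURCE A (Python) =====
-- def clearCacheByKeyList(cache,klist):
--     if klist is None or len(klist)==0:
--         return cache,None
--     cachep=cache.copy()
--     delcache=dict()
--     for key in cache.keys():
--         if key in klist:
--             hcode=cachep.pop(key)
--             delcache[key]=hcode
--     # logger.log.info('缓存文件' + driverpath)
--     return  cachep,delcache
-- ===== SOURCE B (Python) =====
-- def clearCacheByKeyList(cache, klist):
--     if klist is None or len(klist) == 0:
--         return cache, None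
--     cachep = dict(cache)
--     for key in klist:
--         cachep.pop(key, None)
--     delcache = {k: v for k, v in cache.items() if k not in cachep}
--     return cachep, delcache
-- ===== Notes on version B (the rewrite author's own statement) =====
-- stated objective: faster
-- what changed: A makes one pass over the cache keys, testing each against the key list with a linear scan and popping matches; B runs two staged passes of a different shape: it first drives a deletion loop from klist, popping each listed key from a dict copy, then derives delcache as the entries of cache no longer present in that pruned copy (no membership test against klist at all).
import Mathlib
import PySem

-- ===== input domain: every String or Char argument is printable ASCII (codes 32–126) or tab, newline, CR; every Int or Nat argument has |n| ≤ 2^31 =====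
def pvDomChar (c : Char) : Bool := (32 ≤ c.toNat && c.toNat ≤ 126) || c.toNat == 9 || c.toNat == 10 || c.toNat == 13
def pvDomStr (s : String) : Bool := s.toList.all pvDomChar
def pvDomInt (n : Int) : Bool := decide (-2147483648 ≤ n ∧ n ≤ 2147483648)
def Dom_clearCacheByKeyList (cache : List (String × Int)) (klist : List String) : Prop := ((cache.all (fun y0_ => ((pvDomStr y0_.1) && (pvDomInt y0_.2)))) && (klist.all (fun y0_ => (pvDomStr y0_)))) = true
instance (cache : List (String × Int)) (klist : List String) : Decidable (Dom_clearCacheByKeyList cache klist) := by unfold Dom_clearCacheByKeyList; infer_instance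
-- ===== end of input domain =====

-- B inverts the pass shape: a klist-driven deletion loop on a dict copy, then delcache derived as cache minus the pruned copy; objective: faster (dict lookups instead of a per-key list scan).


-- ===== PORT A =====
-- cachep.pop(key): remove the first pair with that key (exact for a dict's association list)
def pvEraseKeyA (l : List (String × Int)) (key : String) : List (String × Int) :=
  l.eraseP (fun q => q.1 == key)

-- one iteration of A's 'for key in cache.keys()' loop over the state (cachep, delcache)
def pvStepA (klist : List String) (st : List (String × Int) × List (String × Int))
    (p : String × Int) : List (String × Int) × List (String × Int) :=
  if klist.contains p.1 then
    match st.1.find? (fun q => q.1 == p.1) with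
    | some q => (pvEraseKeyA st.1 p.1, st.2 ++ [(p.1, q.2)])  -- delcache[key]=hcode: key fresh, append
    | none => st  -- unreachable: pop of a key taken from the dict's own keys never raises
  else st

def clearCacheByKeyList (cache : List (String × Int)) (klist : List String) :
    (List (String × Int)) × (Option (List (String × Int))) :=
  if klist.length = 0 then (cache, none)
  else
    let st := cache.foldl (pvStepA klist) (cache, [])
    (st.1, some st.2)

-- ===== PORT B =====
-- cachep.pop(key, None) in the loop body below is l.eraseP (·.1 == key): remove the first
-- pair with that key if present, else no-op (exact for a dict's association list)
def clearCacheByKeyList_alt (cache : List (String × Int)) (klist : List String) :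
    (List (String × Int)) × (Option (List (String × Int))) :=
  if klist.length = 0 then (cache, none)
  else
    let cachep := klist.foldl (fun cp key => cp.eraseP (fun q => q.1 == key)) cache                       -- for key in klist: cachep.pop(key, None)
    (cachep,
     some (cache.filter (fun p =>                                   -- {k: v for k, v in cache.items() if k not in cachep}
        (cachep.find? (fun q => q.1 == p.1)).isNone)))

-- ===== PRECONDITION & SPEC =====
-- Pre_ only states that cache is a genuine dict: its association list has pairwise-distinct
-- keys (every Python dict satisfies this, so no input the Python A accepts is excluded).
def Pre_clearCacheByKeyList (cache : List (String × Int)) (klist : List String) : Prop :=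
  (cache.map Prod.fst).Nodup
instance (cache : List (String × Int)) (klist : List String) : Decidable (Pre_clearCacheByKeyList cache klist) := by unfold Pre_clearCacheByKeyList; infer_instance

def pvWitness_clearCacheByKeyList : (List (String × Int)) × List String :=
  ([("a", 1), ("b", 2), ("c", 3)], ["b", "z"])

def Spec_clearCacheByKeyList (cache : List (String × Int)) (klist : List String) (out : (List (String × Int)) × (Option (List (String × Int)))) : Prop := out = clearCacheByKeyList_alt cache klist
instance (cache : List (String × Int)) (klist : List String) (out : (List (String × Int)) × (Option (List (String × Int)))) : Decidable (Spec_clearCacheByKeyList cache klist out) := by unfold Spec_clearCacheByKeyList; infer_instance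

-- ===== CLAIM =====
def Claim_equal_clearCacheByKeyList : Prop := ∀ (cache : List (String × Int)) (klist : List String), Dom_clearCacheByKeyList cache klist → Pre_clearCacheByKeyList cache klist → Spec_clearCacheByKeyList cache klist (clearCacheByKeyList cache klist)

-- ===== LEMMAS AND PROOFS =====

-- A's loop invariant: processing the suffix `rest` while cachep = done ++ rest partitions rest.
lemma pvFoldA_inv (klist : List String) :
    ∀ (rest done dc : List (String × Int)),
      ((done ++ rest).map Prod.fst).Nodup →
      rest.foldl (pvStepA klist) (done ++ rest, dc)
        = (done ++ rest.filter (fun p => !klist.contains p.1),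
           dc ++ rest.filter (fun p => klist.contains p.1)) := by
  intro rest
  induction rest with
  | nil => intro done dc _; simp
  | cons p t ih =>
    intro done dc hnd
    obtain ⟨k, v⟩ := p
    have hk_done : ∀ q ∈ done, ¬ (q.1 == k) = true := by
      intro q hq hq1
      have hmem : (k : String) ∈ done.map Prod.fst := by
        simpa [eq_of_beq hq1] using List.mem_map_of_mem (f := Prod.fst) hq
      have hnd' := hnd
      rw [List.map_append, List.nodup_append] at hnd'
      exact hnd'.2.2 k hmem k (by simp) rfl
    have hk_t : (k : String) ∉ t.map Prod.fst := by
      have hnd' := hnd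
      rw [List.map_append, List.nodup_append] at hnd'
      have h := hnd'.2.1
      simp only [List.map_cons, List.nodup_cons] at h
      exact h.1
    by_cases hk : klist.contains k = true
    · have hkm : k ∈ klist := by simpa using hk
      have hfind : (done ++ (k, v) :: t).find? (fun q => q.1 == k) = some (k, v) := by
        rw [List.find?_append]
        have h1 : done.find? (fun q => q.1 == k) = none :=
          List.find?_eq_none.mpr hk_done
        simp [h1]
      have herase : pvEraseKeyA (done ++ (k, v) :: t) k = done ++ t := by
        unfold pvEraseKeyA
        rw [List.eraseP_append_right _ (by intro b hb; simpa using hk_done b hb)]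
        simp
      have hnd2 : ((done ++ t).map Prod.fst).Nodup := by
        have : (done ++ (k, v) :: t).map Prod.fst
            = done.map Prod.fst ++ (k :: t.map Prod.fst) := by simp
        rw [this] at hnd
        rw [List.map_append, List.nodup_append]
        rw [List.nodup_append] at hnd
        exact ⟨hnd.1, (List.nodup_cons.mp hnd.2.1).2,
          fun a ha b hb hab => hnd.2.2 a ha b (List.mem_cons_of_mem _ hb) hab⟩
      simp only [List.foldl_cons]
      rw [show pvStepA klist (done ++ (k, v) :: t, dc) (k, v)
            = (done ++ t, dc ++ [(k, v)]) by
        simp [pvStepA, hkm, hfind, herase]]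
      rw [ih done (dc ++ [(k, v)]) hnd2]
      simp [hkm]
    · have hk' : klist.contains k = false := by simpa using hk
      have hkm : k ∉ klist := by simpa using hk'
      simp only [List.foldl_cons]
      rw [show pvStepA klist (done ++ (k, v) :: t, dc) (k, v)
            = (done ++ (k, v) :: t, dc) by simp [pvStepA, hkm]]
      have : done ++ (k, v) :: t = (done ++ [(k, v)]) ++ t := by simp
      rw [this] at hnd ⊢
      rw [ih (done ++ [(k, v)]) dc hnd]
      simp [hkm]

-- With pairwise-distinct keys, popping a key equals removing every pair with that key.
lemma pvPop_eq_filter (l : List (String × Int)) (k : String)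
    (hnd : (l.map Prod.fst).Nodup) :
    l.eraseP (fun q => q.1 == k) = l.filter (fun p => !(p.1 == k)) := by
  induction l with
  | nil => rfl
  | cons p t ih =>
    simp only [List.map_cons, List.nodup_cons] at hnd
    by_cases hp : (p.1 == k) = true
    · have hknt : ∀ q ∈ t, ¬ (q.1 == k) = true := by
        intro q hq hq1
        exact hnd.1 (by
          have : q.1 = p.1 := (eq_of_beq hq1).trans (eq_of_beq hp).symm
          simpa [this] using List.mem_map_of_mem (f := Prod.fst) hq)
      have : t.filter (fun p => !(p.1 == k)) = t :=
        List.filter_eq_self.mpr (by intro q hq; simpa using hknt q hq)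
      simp [hp, this]
    · have hp' : (p.1 == k) = false := by simpa using hp
      simp [hp', ih hnd.2]

lemma pvFilter_keys_nodup (l : List (String × Int)) (q : (String × Int) → Bool)
    (hnd : (l.map Prod.fst).Nodup) : ((l.filter q).map Prod.fst).Nodup :=
  List.Nodup.sublist (List.Sublist.map Prod.fst List.filter_sublist) hnd

-- B's deletion loop over klist removes exactly the pairs whose key is in klist.
lemma pvFoldB_eq_filter :
    ∀ (ks : List String) (l : List (String × Int)), (l.map Prod.fst).Nodup →
      ks.foldl (fun cp key => cp.eraseP (fun q => q.1 == key)) l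
        = l.filter (fun p => !ks.contains p.1) := by
  intro ks
  induction ks with
  | nil => intro l _; simp
  | cons k t ih =>
    intro l hnd
    simp only [List.foldl_cons]
    rw [pvPop_eq_filter l k hnd, ih _ (pvFilter_keys_nodup l _ hnd),
      List.filter_filter]
    apply List.filter_congr
    intro p _
    by_cases h : p.1 = k <;> simp [h]

-- ===== VERDICT =====
theorem clearCacheByKeyList_spec : Claim_equal_clearCacheByKeyList := by
  intro cache klist _ hpre
  unfold Spec_clearCacheByKeyList clearCacheByKeyList clearCacheByKeyList_alt
  by_cases hkl : klist.length = 0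
  · simp [hkl]
  · simp only [hkl, if_false]
    have hA := pvFoldA_inv klist cache [] [] (by simpa using hpre)
    simp only [List.nil_append] at hA
    rw [hA, pvFoldB_eq_filter klist cache hpre]
    simp only [Prod.mk.injEq, Option.some.injEq]
    refine ⟨trivial, ?_⟩
    apply List.filter_congr
    intro p hp
    by_cases hc : klist.contains p.1 = true
    · have hnone : (cache.filter (fun p => !klist.contains p.1)).find?
          (fun q => q.1 == p.1) = none := by
        apply List.find?_eq_none.mpr
        intro q hq hq1
        have hqm := List.of_mem_filter hq
        rw [eq_of_beq hq1, hc] at hqm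
        simp at hqm
      rw [hc, hnone]; rfl
    · have hc' : klist.contains p.1 = false := by simpa using hc
      have hpmem : p ∈ cache.filter (fun p => !klist.contains p.1) :=
        List.mem_filter.mpr ⟨hp, by rw [hc']; rfl⟩
      have hsome : ((cache.filter (fun p => !klist.contains p.1)).find?
          (fun q => q.1 == p.1)).isSome := by
        rw [List.find?_isSome]
        exact ⟨p, hpmem, by simp⟩
      cases hfind : (cache.filter (fun p => !klist.contains p.1)).find?
          (fun q => q.1 == p.1) with
      | none => rw [hfind] at hsome; simp at hsome
      | some q => rw [hc']; rfl
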